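-- pv_equiv track=rewrite | github.com/cyphou/TableauToFabric | tableau_export/dax_converter.py | _convert_string_concat
-- ===== SOURCE A (Python) =====
-- def _convert_string_concat(dax):
--     """Convert Tableau + to DAX & for string concatenation.
--
--     When the formula is known to be a string type, ALL ``+`` operators are
--     converted to ``&`` EXCEPT those that are clearly arithmetic — detected
--     when the ``+`` is immediately preceded or followed by a numeric literal
--     (e.g. ``FIND(...) + 1`` or ``2 + LEN(...)``).  String-literal adjacency
--     (a ``"..."`` token right before/after the ``+``) keeps the ``&``.
--     """
--     result = []
--     in_string = False
--     i = 0
--     while i < len(dax):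
--         ch = dax[i]
--         if in_string:
--             result.append(ch)
--             if ch == '"':
--                 in_string = False
--             i += 1
--             continue
--         if ch == '"':
--             in_string = True
--             result.append(ch)
--             i += 1
--             continue
--         if ch == '+':
--             # Look at non-space tokens immediately before and after the +
--             # to decide if this is arithmetic.
--             left = ''.join(result).rstrip()
--             right_part = dax[i + 1:].lstrip()
--             numeric_before = bool(left) and (left[-1].isdigit() or left[-1] == '.')
--             numeric_after = bool(right_part) and (right_part[0].isdigit() or right_part[0] == '.')
--             if numeric_before or numeric_after:
--                 # Both sides are numeric literals → arithmetic
--                 result.append('+')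
--             else:
--                 result.append('&')
--         else:
--             result.append(ch)
--         i += 1
--     return ''.join(result)
-- ===== SOURCE B (Python) =====
-- def _convert_string_concat(dax):
--     """Single pass: track the last non-space char emitted instead of
--     re-joining/rstripping the whole result at every plus sign, and consume
--     string literals in an inner loop; the right-hand check forward-scans
--     spaces only up to the next non-space char."""
--     n = len(dax)
--     out = []
--     last = ''  # last non-whitespace character emitted so far ('' if none)
--     i = 0
--     while i < n:
--         ch = dax[i]
--         if ch == '"':
--             out.append(ch)
--             i += 1
--             while i < n:
--                 c = dax[i]
--                 out.append(c)
--                 i += 1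
--                 if c == '"':
--                     break
--             last = '"'
--             continue
--         if ch == '+':
--             j = i + 1
--             while j < n and dax[j].isspace():
--                 j += 1
--             numeric_before = last.isdigit() or last == '.'
--             numeric_after = j < n and (dax[j].isdigit() or dax[j] == '.')
--             c = '+' if (numeric_before or numeric_after) else '&'
--             out.append(c)
--             last = c
--         else:
--             out.append(ch)
--             if not ch.isspace():
--                 last = ch
--         i += 1
--     return ''.join(out)
-- ===== Notes on version B (the rewrite author's own statement) =====
-- stated objective: alternative
-- what changed: B makes a single pass that keeps the last non-space emitted character in a variable and forward-scans only the spaces after a plus sign, instead of re-joining the whole result and rstrip/lstrip-ing full copies at every plus; string literals are consumed by a dedicated inner loop.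
import Mathlib
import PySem

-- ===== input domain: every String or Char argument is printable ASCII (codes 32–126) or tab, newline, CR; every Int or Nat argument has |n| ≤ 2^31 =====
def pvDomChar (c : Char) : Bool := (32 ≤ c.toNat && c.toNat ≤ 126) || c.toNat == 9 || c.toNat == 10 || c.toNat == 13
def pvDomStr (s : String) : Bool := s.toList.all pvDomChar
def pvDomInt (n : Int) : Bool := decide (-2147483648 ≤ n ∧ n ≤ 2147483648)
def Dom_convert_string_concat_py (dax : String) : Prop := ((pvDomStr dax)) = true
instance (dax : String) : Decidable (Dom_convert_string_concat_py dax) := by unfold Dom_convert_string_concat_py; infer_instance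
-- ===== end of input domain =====

-- B replaces A's per-plus rejoin/rstrip/lstrip of whole result copies by a single pass
-- that tracks the last non-space emitted character (objective: alternative).

-- ===== PORT A =====
-- A's while loop over indices, transcribed as structural recursion on the remaining
-- suffix of the input; `acc` is A's `result` list in order (append = Python append).
-- `left = ''.join(result).rstrip()` is `PySem.Chars.rstrip acc`; `bool(left) and
-- (left[-1].isdigit() or left[-1] == '.')` is the match on `.getLast?` (none ↔ empty,
-- left[-1] on a nonempty list = getLast); `dax[i+1:].lstrip()` is `PySem.Chars.lstrip rest`.
def goA : List Char → Bool → List Char → List Char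
  | [], _, acc => acc
  | ch :: rest, inStr, acc =>
    if inStr then
      goA rest (if ch = '"' then false else true) (acc ++ [ch])
    else if ch = '"' then
      goA rest true (acc ++ [ch])
    else if ch = '+' then
      let left := PySem.Chars.rstrip acc
      let right := PySem.Chars.lstrip rest
      let nb := match left.getLast? with
        | some c => PySem.Chars.isdigit c || c == '.'
        | none => false
      let na := match right.head? with
        | some c => PySem.Chars.isdigit c || c == '.'
        | none => false
      goA rest false (acc ++ [if nb || na then '+' else '&'])
    else
      goA rest false (acc ++ [ch])

def convert_string_concat_py (dax : String) : String :=
  String.ofList (goA dax.toList false [])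

-- ===== PORT B =====
-- B's inner `while` consuming a string literal up to and including the closing quote:
-- returns (consumed chars in order, remaining suffix).
def takeStrB : List Char → List Char → (List Char × List Char)
  | [], acc => (acc, [])
  | c :: rest, acc => if c = '"' then (acc ++ [c], rest) else takeStrB rest (acc ++ [c])

theorem takeStrB_len_le (l acc : List Char) : (takeStrB l acc).2.length ≤ l.length := by
  induction l generalizing acc with
  | nil => simp [takeStrB]
  | cons c rest ih =>
    simp only [takeStrB]
    split
    · simp
    · exact le_trans (ih _) (Nat.le_succ _)

-- B's `while j < n and dax[j].isspace(): j += 1` forward scan.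
def skipSpB : List Char → List Char
  | [] => []
  | c :: rest => if PySem.Chars.isspace c then skipSpB rest else c :: rest

-- B's main single pass: `last` is the last non-whitespace character emitted ('' → none).
def goB : List Char → Option Char → List Char → List Char
  | [], _, out => out
  | ch :: rest, last, out =>
    if ch = '"' then
      let p := takeStrB rest []
      goB p.2 (some '"') (out ++ [ch] ++ p.1)
    else if ch = '+' then
      let r := skipSpB rest
      let nb := match last with
        | some c => PySem.Chars.isdigit c || c == '.'
        | none => false
      let na := match r.head? with
        | some c => PySem.Chars.isdigit c || c == '.'
        | none => false
      let c := if nb || na then '+' else '&'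
      goB rest (some c) (out ++ [c])
    else
      goB rest (if PySem.Chars.isspace ch then last else some ch) (out ++ [ch])
termination_by l _ _ => l.length
decreasing_by
  · exact Nat.lt_succ_of_le (takeStrB_len_le rest [])
  · exact Nat.lt_succ_of_le le_rfl
  · exact Nat.lt_succ_of_le le_rfl

def convert_string_concat_py_alt (dax : String) : String :=
  String.ofList (goB dax.toList none [])

-- ===== PRECONDITION & SPEC =====
def Spec_convert_string_concat_py (dax : String) (out : String) : Prop := out = convert_string_concat_py_alt dax
instance (dax : String) (out : String) : Decidable (Spec_convert_string_concat_py dax out) := by unfold Spec_convert_string_concat_py; infer_instance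

-- ===== CLAIM (what is proved, stated in full; the proofs are below) =====
def Claim_equal_convert_string_concat_py : Prop := ∀ (dax : String), Dom_convert_string_concat_py dax → Spec_convert_string_concat_py dax (convert_string_concat_py dax)

-- ===== LEMMAS AND PROOFS =====

-- the last non-space character of the accumulated output (B's `last` invariant value)
def lastNS (acc : List Char) : Option Char := (PySem.Chars.rstrip acc).getLast?

theorem goB_nil (last : Option Char) (out : List Char) : goB [] last out = out := by
  rw [goB.eq_def]

theorem goB_cons (ch : Char) (rest : List Char) (last : Option Char) (out : List Char) :
    goB (ch :: rest) last out =
      (if ch = '"' then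
        goB (takeStrB rest []).2 (some '"') (out ++ [ch] ++ (takeStrB rest []).1)
      else if ch = '+' then
        goB rest
          (some (if ((match last with
                      | some c => PySem.Chars.isdigit c || c == '.'
                      | none => false) ||
                     (match (skipSpB rest).head? with
                      | some c => PySem.Chars.isdigit c || c == '.'
                      | none => false)) then '+' else '&'))
          (out ++ [if ((match last with
                        | some c => PySem.Chars.isdigit c || c == '.'
                        | none => false) ||
                       (match (skipSpB rest).head? with
                        | some c => PySem.Chars.isdigit c || c == '.'
                        | none => false)) then '+' else '&'])
      else
        goB rest (if PySem.Chars.isspace ch then last else some ch) (out ++ [ch])) := by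
  rw [goB.eq_def]

theorem lastNS_append (acc : List Char) (c : Char) :
    lastNS (acc ++ [c]) = if PySem.Chars.isspace c then lastNS acc else some c := by
  by_cases h : PySem.Chars.isspace c <;>
    simp [lastNS, PySem.Chars.rstrip, h]

theorem skipSpB_eq (l : List Char) : skipSpB l = l.dropWhile PySem.Chars.isspace := by
  induction l with
  | nil => rfl
  | cons c rest ih => simp only [skipSpB, List.dropWhile]; split_ifs with h <;> simp [h, ih]

theorem takeStrB_acc (l acc : List Char) :
    takeStrB l acc = (acc ++ (takeStrB l []).1, (takeStrB l []).2) := by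
  induction l generalizing acc with
  | nil => simp [takeStrB]
  | cons c rest ih =>
    simp only [takeStrB]
    split
    · simp
    · simp only [List.nil_append]
      rw [ih (acc ++ [c]), ih [c]]; simp

-- the combined loop invariant: outside a string literal A's loop equals B's loop with
-- `last = lastNS acc`; inside a string literal A's loop equals B's string-consuming
-- helper followed by B's loop.
theorem go_invariant (n : Nat) :
    (∀ rest acc, rest.length ≤ n → goA rest false acc = goB rest (lastNS acc) acc) ∧
    (∀ rest acc, rest.length ≤ n →
      goA rest true acc = goB (takeStrB rest []).2 (some '"') (acc ++ (takeStrB rest []).1)) := by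
  induction n with
  | zero =>
    constructor <;> intro rest acc h <;>
      · rw [List.length_eq_zero_iff.mp (Nat.le_zero.mp h)]
        simp [goA, goB_nil, takeStrB]
  | succ n ih =>
    obtain ⟨ihF, ihT⟩ := ih
    constructor
    · intro rest acc h
      match rest with
      | [] => simp [goA, goB_nil]
      | ch :: rest =>
        have hlen : rest.length ≤ n := by simpa using Nat.lt_succ_iff.mp (Nat.lt_of_lt_of_le (by simp) h)
        by_cases hq : ch = '"'
        · subst hq
          rw [goA, if_neg (by simp), if_pos rfl, goB_cons, if_pos rfl,
            ihT rest (acc ++ ['"']) hlen]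
        · by_cases hp : ch = '+'
          · subst hp
            rw [goA, if_neg (by simp), if_neg (by decide), if_pos rfl, goB_cons,
              if_neg (by decide), if_pos rfl]
            simp only [skipSpB_eq, lastNS]
            have : PySem.Chars.lstrip rest = rest.dropWhile PySem.Chars.isspace := rfl
            rw [this]
            set nb := (match (PySem.Chars.rstrip acc).getLast? with
              | some c => PySem.Chars.isdigit c || c == '.'
              | none => false) with hnb
            set na := (match (rest.dropWhile PySem.Chars.isspace).head? with
              | some c => PySem.Chars.isdigit c || c == '.'
              | none => false) with hna
            have hs : PySem.Chars.isspace (if nb || na then '+' else '&') = false := by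
              rcases Bool.eq_false_or_eq_true (nb || na) with h1 | h1 <;> simp [h1] <;> decide
            rw [ihF rest (acc ++ [if nb || na then '+' else '&']) hlen, lastNS_append, hs]
            simp
          · rw [goA, if_neg (by simp), if_neg hq, if_neg hp, goB_cons, if_neg hq, if_neg hp,
              ihF rest (acc ++ [ch]) hlen, lastNS_append]
    · intro rest acc h
      match rest with
      | [] => simp [goA, goB_nil, takeStrB]
      | ch :: rest =>
        have hlen : rest.length ≤ n := by simpa using Nat.lt_succ_iff.mp (Nat.lt_of_lt_of_le (by simp) h)
        by_cases hq : ch = '"'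
        · subst hq
          rw [goA, if_pos (by simp), if_pos rfl]
          simp only [takeStrB]
          rw [ihF rest (acc ++ ['"']) hlen, lastNS_append]
          simp [show PySem.Chars.isspace '"' = false from by decide]
        · rw [goA, if_pos (by simp), if_neg hq]
          simp only [takeStrB, if_neg hq]
          show goA rest true (acc ++ [ch]) =
            goB (takeStrB rest [ch]).2 (some '"') (acc ++ (takeStrB rest [ch]).1)
          rw [takeStrB_acc rest [ch], ihT rest (acc ++ [ch]) hlen]
          simp

-- ===== VERDICT (by name: the statement is the Claim_ definition above) =====
theorem convert_string_concat_py_spec : Claim_equal_convert_string_concat_py := by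
  intro dax _
  unfold Spec_convert_string_concat_py convert_string_concat_py convert_string_concat_py_alt
  rw [(go_invariant dax.toList.length).1 dax.toList [] le_rfl]
  rfl
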